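-- pv_equiv track=rewrite | github.com/Spectating101/nocturnal-archive | cite-agent-api/src/ingest/sec/sections.py | get_risk_factors
-- ===== SOURCE A (Python) =====
-- from typing import Dict, List
--
-- def get_risk_factors(sections: Dict[str, str]) -> str:
--     """
--     Extract risk factors from sections
--
--     Args:
--         sections: Parsed sections dictionary
--
--     Returns:
--         str: Risk factors text
--     """
--     risk_keys = [
--         "item 1a",
--         "risk factors",
--         "risk factor"
--     ]
--
--     for key in risk_keys:
--         for section_title, content in sections.items():
--             if key in section_title.lower():
--                 return content
--
--     return ""
-- ===== SOURCE B (Python) =====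
-- def get_risk_factors(sections):
--     """Single pass over sections: keep content of the section whose title
--     matches the highest-priority risk key (earliest section wins ties)."""
--     risk_keys = ["item 1a", "risk factors", "risk factor"]
--     best_rank = None
--     best_content = ""
--     for title, content in sections.items():
--         t = title.lower()
--         rank = next((i for i, k in enumerate(risk_keys) if k in t), None)
--         if rank is None:
--             continue
--         if best_rank is None or rank < best_rank:
--             best_rank = rank
--             best_content = content
--     return best_content
-- ===== Notes on version B (the rewrite author's own statement) =====
-- stated objective: alternative
-- what changed: Replaced A's key-outer/section-inner double scan (up to 3 passes over the dict) by a single pass over sections that tracks the best (smallest) key-rank seen so far with a strict-< tie-break.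
import Mathlib
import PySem

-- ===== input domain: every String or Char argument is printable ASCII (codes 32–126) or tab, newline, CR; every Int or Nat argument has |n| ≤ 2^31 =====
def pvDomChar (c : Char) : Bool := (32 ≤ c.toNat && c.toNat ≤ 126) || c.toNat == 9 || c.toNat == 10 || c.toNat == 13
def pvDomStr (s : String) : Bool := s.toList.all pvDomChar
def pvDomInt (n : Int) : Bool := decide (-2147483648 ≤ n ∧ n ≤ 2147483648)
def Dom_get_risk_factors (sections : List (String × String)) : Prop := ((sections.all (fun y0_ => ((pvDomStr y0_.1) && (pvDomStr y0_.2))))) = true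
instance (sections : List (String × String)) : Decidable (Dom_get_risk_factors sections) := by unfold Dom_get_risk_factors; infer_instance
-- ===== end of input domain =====

-- B replaces A's key-outer/section-inner double scan by one pass over the sections
-- tracking the minimal key-rank (alternative decomposition, same exact result).

-- ===== PORT A =====
-- inner 'for section_title, content in sections.items(): if key in title.lower(): return content'
def pvFindSec (key : String) : List (String × String) → Option String
  | [] => none
  | (t, c) :: rest =>
      if PySem.Str.isIn key (PySem.Str.lower t) then some c else pvFindSec key rest

-- outer 'for key in risk_keys: …; return ""'
def pvLoopKeys (sections : List (String × String)) : List String → String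
  | [] => ""
  | k :: ks =>
      match pvFindSec k sections with
      | some c => c
      | none => pvLoopKeys sections ks

def get_risk_factors (sections : List (String × String)) : String :=
  pvLoopKeys sections ["item 1a", "risk factors", "risk factor"]

-- ===== PORT B =====
-- 'next((i for i, k in enumerate(risk_keys) if k in t), None)'
def pvRankOf (i : Nat) (t : String) : List String → Option Nat
  | [] => none
  | k :: ks => if PySem.Str.isIn k t then some i else pvRankOf (i + 1) t ks

-- one iteration of B's loop: keep the strictly smaller rank (earlier section wins ties)
def pvStep (best : Option (Nat × String)) (p : String × String) : Option (Nat × String) :=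
  match pvRankOf 0 (PySem.Str.lower p.1) ["item 1a", "risk factors", "risk factor"] with
  | none => best
  | some r =>
      match best with
      | none => some (r, p.2)
      | some (br, bc) => if r < br then some (r, p.2) else some (br, bc)

def get_risk_factors_alt (sections : List (String × String)) : String :=
  match sections.foldl pvStep none with
  | none => ""
  | some (_, c) => c

-- ===== PRECONDITION & SPEC =====
def Spec_get_risk_factors (sections : List (String × String)) (out : String) : Prop := out = get_risk_factors_alt sections
instance (sections : List (String × String)) (out : String) : Decidable (Spec_get_risk_factors sections out) := by unfold Spec_get_risk_factors; infer_instance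

-- ===== CLAIM (what is proved, stated in full; the proofs are below) =====
def Claim_equal_get_risk_factors : Prop := ∀ (sections : List (String × String)), Dom_get_risk_factors sections → Spec_get_risk_factors sections (get_risk_factors sections)

-- ===== LEMMAS AND PROOFS =====

-- merge of two partial results: the strictly smaller rank wins, left wins ties
def pvMerge : Option (Nat × String) → Option (Nat × String) → Option (Nat × String)
  | none, o => o
  | some b, none => some b
  | some b, some o => if o.1 < b.1 then some o else some b

theorem pvStep_merge (b : Option (Nat × String)) (h : String × String)
    (o : Option (Nat × String)) :
    pvMerge (pvStep b h) o = pvMerge b (pvMerge (pvStep none h) o) := by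
  rcases hr : pvRankOf 0 (PySem.Str.lower h.1) ["item 1a", "risk factors", "risk factor"]
      with _ | r <;>
    rcases b with _ | ⟨br, bc⟩ <;> rcases o with _ | ⟨r', c'⟩ <;>
      simp only [pvStep, hr, pvMerge] <;> (try split_ifs) <;>
        simp only [pvMerge] <;> (try split_ifs) <;> first | rfl | omega

theorem foldl_pvStep (l : List (String × String)) (b : Option (Nat × String)) :
    l.foldl pvStep b = pvMerge b (l.foldl pvStep none) := by
  induction l generalizing b with
  | nil => cases b <;> simp [pvMerge]
  | cons h t ih =>
      simp only [List.foldl_cons]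
      rw [ih (pvStep b h), ih (pvStep none h), pvStep_merge]

theorem bestOf_spec (l : List (String × String)) :
    l.foldl pvStep none =
      match pvFindSec "item 1a" l with
      | some c => some (0, c)
      | none =>
        match pvFindSec "risk factors" l with
        | some c => some (1, c)
        | none =>
          match pvFindSec "risk factor" l with
          | some c => some (2, c)
          | none => none := by
  induction l with
  | nil => simp [pvFindSec]
  | cons h t ih =>
      rcases h with ⟨ht, hc⟩
      rw [List.foldl_cons, foldl_pvStep, ih]
      simp only [pvStep, pvFindSec, pvRankOf]
      generalize PySem.Str.isIn "item 1a" (PySem.Str.lower ht) = b0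
      generalize PySem.Str.isIn "risk factors" (PySem.Str.lower ht) = b1
      generalize PySem.Str.isIn "risk factor" (PySem.Str.lower ht) = b2
      cases b0 <;> cases b1 <;> cases b2 <;>
        rcases pvFindSec "item 1a" t with _ | c0 <;>
          rcases pvFindSec "risk factors" t with _ | c1 <;>
            rcases pvFindSec "risk factor" t with _ | c2 <;>
              simp [pvMerge]

-- ===== VERDICT (by name: the statement is the Claim_ definition above) =====
theorem get_risk_factors_spec : Claim_equal_get_risk_factors := by
  intro sections _
  show get_risk_factors sections = get_risk_factors_alt sections
  unfold get_risk_factors get_risk_factors_alt pvLoopKeys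
  rw [bestOf_spec]
  rcases hf0 : pvFindSec "item 1a" sections with _ | c0 <;>
    rcases hf1 : pvFindSec "risk factors" sections with _ | c1 <;>
      rcases hf2 : pvFindSec "risk factor" sections with _ | c2 <;>
        simp [pvLoopKeys, hf0, hf1, hf2]
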